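-- pv_equiv track=rewrite | github.com/alexandraback/datacollection | solutions_2463486_1/Python/robsci/C-FairAndSquare.py | getpartPalindromes
-- ===== SOURCE A (Python) =====
-- def digitsToNumber(digits):
-- 	x = 0
-- 	num = len(digits)
-- 	for i in range(num):
-- 		x += digits[i] * pow(10, num - 1 - i)
-- 	return x
--
-- def paldigitsToNumber(paldigits, odd):
-- 	revdigits = [dig for dig in paldigits]
-- 	revdigits.reverse()
-- 	if odd:
-- 		revdigits = revdigits[1:]
-- 	return digitsToNumber(paldigits + revdigits)
--
-- def getpartPalindromes(paldigits, odd, level):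
-- 	palindromes = []
-- 	if level == 1:
-- 		for i in range(10):
-- 			newdigs = paldigits[:-1] + [i]
-- 			if newdigs[0] != 0:
-- 				palindromes.append(paldigitsToNumber(newdigs, odd))
-- 		return palindromes
-- 	else:
-- 		for i in range(10):
-- 			newdigs = paldigits[:-level] + [i] + paldigits[1 - level:]
-- 			if newdigs[0] != 0:
-- 				palindromes += getpartPalindromes(newdigs, odd, level - 1)
-- 		return palindromes
-- ===== SOURCE B (Python) =====
-- # B: iterative base-10 counter over the free (last `level`) positions instead of
-- # per-level recursion; Horner evaluation of the palindrome instead of per-digit pow().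
-- def getpartPalindromes(paldigits, odd, level):
--     n = len(paldigits)
--     palindromes = []
--     for m in range(10 ** level):
--         newdigs = list(paldigits)
--         v = m
--         for j in range(level):
--             newdigs[n - 1 - j] = v % 10
--             v //= 10
--         if newdigs[0] != 0:
--             full = newdigs + (newdigs[:-1][::-1] if odd else newdigs[::-1])
--             x = 0
--             for d in full:
--                 x = x * 10 + d
--             palindromes.append(x)
--     return palindromes
-- ===== Notes on version B (the rewrite author's own statement) =====
-- stated objective: alternative
-- what changed: Replaced A's per-level recursion (one nested loop level per free digit) by a single iterative base-10 counter m in range(10**level) whose digits are written into the last level positions, and replaced the per-digit pow(10,...) number conversion by Horner evaluation.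
-- outside the precondition, e.g. on getpartPalindromes([], False, 1): A returns [11, 22, 33, 44, 55, 66, 77, 88, 99], B raises IndexError; on getpartPalindromes([1], False, 0): A raises RecursionError, B returns [11]
import Mathlib
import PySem

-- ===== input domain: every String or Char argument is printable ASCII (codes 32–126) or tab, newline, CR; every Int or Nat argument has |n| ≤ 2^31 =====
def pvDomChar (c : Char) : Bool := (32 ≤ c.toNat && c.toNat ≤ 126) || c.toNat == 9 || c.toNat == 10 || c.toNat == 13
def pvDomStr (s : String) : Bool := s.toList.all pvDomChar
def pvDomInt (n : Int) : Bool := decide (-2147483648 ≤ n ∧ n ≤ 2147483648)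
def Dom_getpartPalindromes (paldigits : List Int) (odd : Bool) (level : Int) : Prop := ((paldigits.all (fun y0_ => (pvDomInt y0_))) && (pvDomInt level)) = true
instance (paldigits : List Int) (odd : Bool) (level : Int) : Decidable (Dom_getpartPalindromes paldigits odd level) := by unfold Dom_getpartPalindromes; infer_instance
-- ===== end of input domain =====

-- B replaces A's per-level recursion by a single base-10 counter over the free positions
-- and Horner evaluation of the palindrome (objective: alternative decomposition, same cost).

-- ===== PORT A =====
-- digits[i] for i in range(len(digits)) is always in range, so getD is exact here.
def digitsToNumberA (digits : List Int) : Int :=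
  (List.range digits.length).foldl
    (fun x i => x + digits.getD i 0 * (10 : Int) ^ (digits.length - 1 - i)) 0

-- revdigits[1:] is List.drop 1 (exact for every list)
def paldigitsToNumberA (paldigits : List Int) (odd : Bool) : Int :=
  let revdigits := paldigits.reverse
  let revdigits := if odd then revdigits.drop 1 else revdigits
  digitsToNumberA (paldigits ++ revdigits)

-- newdigs of the two branches (named so the loops below stay readable);
-- newdigs is nonempty in both branches, so Python's newdigs[0] is getD 0 0.
def newdigsA1 (paldigits : List Int) (i : Nat) : List Int :=
  paldigits.dropLast ++ [(i : Int)]                        -- paldigits[:-1] + [i]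

def newdigsA (paldigits : List Int) (k : Nat) (i : Nat) : List Int :=
  PySem.List.slice paldigits none (some (-(k+2 : Int))) ++ [(i : Int)]
    ++ PySem.List.slice paldigits (some (1 - (k+2 : Int))) none   -- paldigits[:-level] + [i] + paldigits[1-level:]

-- A's recursion, fuelled by level.toNat (Python diverges for level ≤ 0; the 0 case is
-- unreachable under Pre_).
def goA (odd : Bool) : Nat → List Int → List Int
  | 0, _ => []
  | 1, paldigits =>
    (List.range 10).foldl (fun acc i =>
      if (newdigsA1 paldigits i).getD 0 0 ≠ 0
      then acc ++ [paldigitsToNumberA (newdigsA1 paldigits i) odd] else acc) []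
  | (k+2), paldigits =>
    (List.range 10).foldl (fun acc i =>
      if (newdigsA paldigits k i).getD 0 0 ≠ 0
      then acc ++ goA odd (k+1) (newdigsA paldigits k i) else acc) []

def getpartPalindromes (paldigits : List Int) (odd : Bool) (level : Int) : List Int :=
  if level ≤ 0 then [] else goA odd level.toNat paldigits

-- ===== PORT B =====
-- the inner 'for j in range(level): newdigs[n-1-j] = v % 10; v //= 10' loop
-- (m, hence v, is a nonnegative counter, so Nat % and / are exact; inside Pre_
-- the index n-1-j is in range, so List.set is exact)
def bWrite (n : Nat) : List Int → Nat → Nat → Nat → List Int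
  | newdigs, _, _, 0 => newdigs
  | newdigs, v, j, c+1 => bWrite n (newdigs.set (n - 1 - j) ((v % 10 : Nat) : Int)) (v / 10) (j+1) c

-- newdigs[:-1][::-1] = dropLast then reverse; newdigs[::-1] = reverse; then Horner
def hornerNum (newdigs : List Int) (odd : Bool) : Int :=
  let full := newdigs ++ (if odd then newdigs.dropLast.reverse else newdigs.reverse)
  full.foldl (fun x d => x * 10 + d) 0

-- the body of B's counter loop
def bStep (paldigits : List Int) (odd : Bool) (lvl : Nat) (acc : List Int) (m : Nat) : List Int :=
  if (bWrite paldigits.length paldigits m 0 lvl).getD 0 0 ≠ 0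
  then acc ++ [hornerNum (bWrite paldigits.length paldigits m 0 lvl) odd] else acc

-- range(10 ** level): guard level < 0 for totality (Python raises there; outside Pre_)
def getpartPalindromes_alt (paldigits : List Int) (odd : Bool) (level : Int) : List Int :=
  if level < 0 then []
  else (List.range (10 ^ level.toNat)).foldl (bStep paldigits odd level.toNat) []

-- ===== PRECONDITION & SPEC =====
-- Pre_ excludes level ≤ 0 (A recurses forever: RecursionError) and level > len(paldigits),
-- where A's degenerate negative slices make the list GROW and emit duplicated output while
-- the natural B raises IndexError writing position n-1-j.
def Pre_getpartPalindromes (paldigits : List Int) (odd : Bool) (level : Int) : Prop :=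
  1 ≤ level ∧ level ≤ paldigits.length
instance (paldigits : List Int) (odd : Bool) (level : Int) : Decidable (Pre_getpartPalindromes paldigits odd level) := by unfold Pre_getpartPalindromes; infer_instance

def pvWitness_getpartPalindromes : List Int × Bool × Int := ([1, 2, 3], true, 2)

def Spec_getpartPalindromes (paldigits : List Int) (odd : Bool) (level : Int) (out : List Int) : Prop := out = getpartPalindromes_alt paldigits odd level
instance (paldigits : List Int) (odd : Bool) (level : Int) (out : List Int) : Decidable (Spec_getpartPalindromes paldigits odd level out) := by unfold Spec_getpartPalindromes; infer_instance

-- ===== CLAIM (what is proved, stated in full; the proofs are below) =====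
def Claim_equal_getpartPalindromes : Prop := ∀ (paldigits : List Int) (odd : Bool) (level : Int), Dom_getpartPalindromes paldigits odd level → Pre_getpartPalindromes paldigits odd level → Spec_getpartPalindromes paldigits odd level (getpartPalindromes paldigits odd level)

-- ===== LEMMAS AND PROOFS =====

-- peeling the most significant digit off the counter: the last write is position n-1-(j+k)
theorem bWrite_split (n : Nat) : ∀ (k j : Nat) (nd : List Int) (i r : Nat), r < 10 ^ k →
    bWrite n nd (i * 10 ^ k + r) j (k + 1)
      = (bWrite n nd r j k).set (n - 1 - (j + k)) ((i % 10 : Nat) : Int) := by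
  intro k
  induction k with
  | zero =>
    intro j nd i r hr
    interval_cases r
    simp [bWrite]
  | succ k ih =>
    intro j nd i r hr
    have hmod : (i * 10 ^ (k + 1) + r) % 10 = r % 10 := by
      have : i * 10 ^ (k + 1) = (i * 10 ^ k) * 10 := by ring
      omega
    have hdiv : (i * 10 ^ (k + 1) + r) / 10 = i * 10 ^ k + r / 10 := by
      have : i * 10 ^ (k + 1) = (i * 10 ^ k) * 10 := by ring
      omega
    have hr' : r / 10 < 10 ^ k :=
      (Nat.div_lt_iff_lt_mul (by norm_num : (0:Nat) < 10)).mpr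
        (by simpa [pow_succ] using hr)
    show bWrite n (nd.set (n - 1 - j) _) _ (j + 1) (k + 1) = _
    rw [hmod, hdiv, ih (j + 1) _ i (r / 10) hr']
    show _ = (bWrite n (nd.set (n - 1 - j) ((r % 10 : Nat) : Int)) (r / 10) (j + 1) k).set _ _
    congr 1
    omega

-- a set at a position bWrite never touches commutes out
theorem bWrite_set_comm (n : Nat) : ∀ (c j v : Nat) (nd : List Int) (q : Nat) (x : Int),
    (∀ t, t < c → n - 1 - (j + t) ≠ q) →
    bWrite n (nd.set q x) v j c = (bWrite n nd v j c).set q x := by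
  intro c
  induction c with
  | zero => intro j v nd q x _; rfl
  | succ c ih =>
    intro j v nd q x h
    show bWrite n ((nd.set q x).set (n - 1 - j) _) _ (j + 1) c = _
    rw [List.set_comm _ _ (by have := h 0 (by omega); omega : q ≠ n - 1 - j)]
    rw [ih (j + 1) _ _ q x (fun t ht => by
      have := h (t + 1) (by omega); omega)]
    rfl

-- bWrite never changes entry 0 while all touched positions are nonzero
theorem bWrite_getD_zero (n : Nat) : ∀ (c j v : Nat) (nd : List Int),
    (∀ t, t < c → n - 1 - (j + t) ≠ 0) →
    (bWrite n nd v j c).getD 0 0 = nd.getD 0 0 := by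
  intro c
  induction c with
  | zero => intro j v nd _; rfl
  | succ c ih =>
    intro j v nd h
    show (bWrite n (nd.set (n - 1 - j) _) _ (j + 1) c).getD 0 0 = _
    rw [ih (j + 1) _ _ (fun t ht => by have := h (t + 1) (by omega); omega)]
    have h0 : n - 1 - j ≠ 0 := by simpa using h 0 (by omega)
    simp [List.getD_eq_getElem?_getD, List.getElem?_set_ne h0]

-- decimal decomposition of the counter range
theorem range_mul (a b : Nat) :
    List.range (a * b) = (List.range a).flatMap (fun i => (List.range b).map (fun r => i * b + r)) := by
  induction a with
  | zero => simp
  | succ a ih =>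
    have : (a + 1) * b = a * b + b := by ring
    rw [this, List.range_add, List.range_succ, List.flatMap_append, ← ih]
    simp [List.flatMap]

-- l[:-1] + [x] writes the last position
theorem dropLast_append_singleton_eq_set (l : List Int) (h : l ≠ []) (x : Int) :
    l.dropLast ++ [x] = l.set (l.length - 1) x := by
  induction l with
  | nil => simp at h
  | cons a t ih =>
    cases t with
    | nil => simp
    | cons b t' => simpa using ih (by simp)

-- A's slice triple is a single set, for 2 ≤ L ≤ n
theorem newdigsA_eq_set (pd : List Int) (k : Nat) (i : Nat) (hn : k + 2 ≤ pd.length) :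
    newdigsA pd k i = pd.set (pd.length - (k + 2)) (i : Int) := by
  unfold newdigsA
  have h1 : (-(k+2 : Int)) = -((k+2 : Nat) : Int) := by push_cast; ring
  have h2 : (1 - (k+2 : Int)) = -((k+1 : Nat) : Int) := by push_cast; ring
  rw [h1, h2, PySem.List.slice_to_neg_natCast pd (k+2) (by omega),
      PySem.List.slice_from_neg_natCast pd (k+1) (by omega)]
  rw [List.set_eq_take_cons_drop (i : Int) (by omega)]
  have hdrop : pd.length - (k + 1) = pd.length - (k + 2) + 1 := by omega
  rw [hdrop]
  simp

-- A's pow-sum digit conversion is Horner evaluation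
theorem digitsToNumberA_horner (ds : List Int) :
    digitsToNumberA ds = ds.foldl (fun x d => x * 10 + d) 0 := by
  unfold digitsToNumberA
  rw [PySem.List.foldl_add]
  induction ds using List.reverseRecOn with
  | nil => simp
  | append_singleton ds a ih =>
    rw [List.foldl_append]
    simp only [List.length_append, List.length_singleton, List.map_append,
      List.sum_append, List.range_succ]
    have hcong : (List.range ds.length).map (fun i =>
          (ds ++ [a]).getD i 0 * (10:Int) ^ (ds.length + 1 - 1 - i))
        = (List.range ds.length).map (fun i => (ds.getD i 0 * (10:Int) ^ (ds.length - 1 - i)) * 10) := by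
      apply List.map_congr_left
      intro i hi
      rw [List.mem_range] at hi
      rw [List.getD_append ds [a] 0 i hi]
      have : ds.length + 1 - 1 - i = (ds.length - 1 - i) + 1 := by omega
      rw [this, pow_succ]
      ring
    rw [hcong, List.sum_map_mul_right]
    have hl : ((List.map (fun i => (ds ++ [a]).getD i 0 * (10:Int) ^ (ds.length + 1 - 1 - i))) [ds.length]).sum = a := by
      simp [List.getD_eq_getElem?_getD]
    rw [hl]
    simp only [List.foldl_cons, List.foldl_nil]
    rw [← ih]
    ring

-- the two palindrome-number helpers agree
theorem palNum_eq (nd : List Int) (odd : Bool) : paldigitsToNumberA nd odd = hornerNum nd odd := by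
  cases odd <;>
    simp [paldigitsToNumberA, hornerNum, digitsToNumberA_horner, List.drop_one]

-- rewrite a conditionally-extending loop body into flatMap form
theorem foldl_body_flatMap {α : Type} (l : List α) (p : α → Prop) [DecidablePred p]
    (g : α → List Int) (acc : List Int) :
    l.foldl (fun acc x => if p x then acc ++ g x else acc) acc
      = acc ++ l.flatMap (fun x => if p x then g x else []) := by
  rw [← PySem.List.foldl_append_eq_flatMap]
  apply PySem.List.foldl_congr_mem
  intro b x _
  split <;> simp

-- B's counter loop in flatMap form
theorem foldl_bStep (pd : List Int) (odd : Bool) (L : Nat) (l : List Nat) (acc : List Int) :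
    l.foldl (bStep pd odd L) acc
      = acc ++ l.flatMap (fun m =>
          if (bWrite pd.length pd m 0 L).getD 0 0 ≠ 0
          then [hornerNum (bWrite pd.length pd m 0 L) odd] else []) := by
  have h : l.foldl (bStep pd odd L) acc
      = l.foldl (fun acc m =>
          if (bWrite pd.length pd m 0 L).getD 0 0 ≠ 0
          then acc ++ [hornerNum (bWrite pd.length pd m 0 L) odd] else acc) acc :=
    PySem.List.foldl_congr_mem _ _ _ _ (fun a m _ => rfl)
  rw [h, foldl_body_flatMap]

-- the main invariant: for 1 ≤ L ≤ |pd|, A's recursion equals B's counter loop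
theorem goA_eq_counter (odd : Bool) : ∀ (L : Nat) (pd : List Int), 1 ≤ L → L ≤ pd.length →
    goA odd L pd = (List.range (10 ^ L)).foldl (bStep pd odd L) [] := by
  intro L
  induction L with
  | zero => intro pd h1 _; omega
  | succ k ih =>
    intro pd _ hlen
    have hpdne : pd ≠ [] := by
      intro h; rw [h] at hlen; simp at hlen
    cases k with
    | zero =>
      -- level 1: both loops run i = 0..9 writing the last position
      show goA odd 1 pd = _
      rw [goA]
      have h10 : (10:Nat) ^ 1 = 10 := by norm_num
      rw [h10]
      apply PySem.List.foldl_congr_mem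
      intro acc i hi
      rw [List.mem_range] at hi
      have hset : newdigsA1 pd i = pd.set (pd.length - 1) (i : Int) :=
        dropLast_append_singleton_eq_set pd hpdne _
      have hw : bWrite pd.length pd i 0 1 = pd.set (pd.length - 1) ((i % 10 : Nat) : Int) := by
        show (pd.set (pd.length - 1 - 0) ((i % 10 : Nat) : Int)) = _
        simp
      simp only [bStep, hw, hset, Nat.mod_eq_of_lt hi, palNum_eq]
    | succ k =>
      -- level k+2: peel the outer digit i, apply the IH at level k+1 on pd.set (n-(k+2)) i
      show goA odd (k + 2) pd = _
      rw [goA]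
      have hb : (10:Nat) ^ (k + 2) = 10 * 10 ^ (k + 1) := by ring
      rw [foldl_body_flatMap, List.nil_append,
          show (10:Nat) ^ (k + 1 + 1) = 10 * 10 ^ (k + 1) from hb, range_mul,
          foldl_bStep, List.nil_append, List.flatMap_assoc]
      apply List.flatMap_congr
      intro i hi
      rw [List.mem_range] at hi
      have hslice : newdigsA pd k i = pd.set (pd.length - (k + 2)) (i : Int) :=
        newdigsA_eq_set pd k i hlen
      have hlen' : (pd.set (pd.length - (k + 2)) (i : Int)).length = pd.length := by simp
      have hih : goA odd (k + 1) (pd.set (pd.length - (k + 2)) (i : Int))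
          = (List.range (10 ^ (k + 1))).foldl (bStep (pd.set (pd.length - (k + 2)) (i : Int)) odd (k + 1)) [] :=
        ih _ (by omega) (by omega)
      -- each inner counter value m = i * 10^(k+1) + r corresponds to writing r into pd'
      have hkey : ∀ r : Nat, r < 10 ^ (k + 1) →
          bWrite pd.length pd (i * 10 ^ (k + 1) + r) 0 (k + 2)
            = bWrite pd.length (pd.set (pd.length - (k + 2)) (i : Int)) r 0 (k + 1) := by
        intro r hr
        rw [bWrite_split pd.length (k + 1) 0 pd i r hr, Nat.mod_eq_of_lt hi]
        rw [bWrite_set_comm pd.length (k + 1) 0 r pd (pd.length - (k + 2)) (i : Int)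
          (fun t ht => by omega)]
        congr 1
        omega
      have hfirst : ∀ r : Nat,
          (bWrite pd.length (pd.set (pd.length - (k + 2)) (i : Int)) r 0 (k + 1)).getD 0 0
            = (pd.set (pd.length - (k + 2)) (i : Int)).getD 0 0 := by
        intro r
        have := bWrite_getD_zero pd.length (k + 1) 0 r (pd.set (pd.length - (k + 2)) (i : Int))
          (fun t ht => by omega)
        simpa [hlen'] using this
      rw [hslice, hih, foldl_bStep, List.nil_append, List.flatMap_map]
      simp only [hlen']
      by_cases hg : (pd.set (pd.length - (k + 2)) (i : Int)).getD 0 0 ≠ 0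
      · rw [if_pos hg]
        apply List.flatMap_congr
        intro r hr
        rw [List.mem_range] at hr
        simp only [hkey r hr]
      · rw [if_neg hg]
        symm
        apply List.flatMap_eq_nil_iff.mpr
        intro r hr
        rw [List.mem_range] at hr
        simp only [hkey r hr, hfirst r, not_not.mp hg]
        simp

-- ===== VERDICT (by name: the statement is the Claim_ definition above) =====
theorem getpartPalindromes_spec : Claim_equal_getpartPalindromes := by
  intro pd odd level _ hpre
  obtain ⟨h1, h2⟩ := hpre
  show getpartPalindromes pd odd level = getpartPalindromes_alt pd odd level
  unfold getpartPalindromes getpartPalindromes_alt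
  rw [if_neg (by omega : ¬ level ≤ 0), if_neg (by omega : ¬ level < 0)]
  exact goA_eq_counter odd level.toNat pd (by omega) (by omega)
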